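-- pv_equiv track=rewrite | github.com/loewenherz-projekt/X4-Scripts | generate_reference_descriptions.py | xml_description
-- ===== SOURCE A (Python) =====
-- def xml_description(cmd, attrs):
--     base = cmd
--     prefix_map = {
--         'find_': 'Sucht {}',
--         'add_': 'Fügt {} hinzu',
--         'remove_': 'Entfernt {}',
--         'set_': 'Setzt {}',
--         'get_': 'Gibt {} zurück',
--         'abort_': 'Bricht {} ab',
--         'activate_': 'Aktiviert {}',
--         'deactivate_': 'Deaktiviert {}',
--         'update_': 'Aktualisiert {}',
--         'toggle_': 'Schaltet {} um',
--         'close_': 'Schließt {}',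
--         'open_': 'Öffnet {}',
--         'start_': 'Startet {}',
--         'stop_': 'Stoppt {}',
--         'clear_': 'Leert {}',
--         'reset_': 'Setzt {} zurück',
--         'calculate_': 'Berechnet {}',
--         'create_': 'Erstellt {}',
--         'destroy_': 'Zerstört {}',
--         'show_': 'Zeigt {}',
--         'hide_': 'Versteckt {}',
--         'move_': 'Bewegt {}',
--         'select_': 'Wählt {} aus',
--         'apply_': 'Wendet {} an',
--         'load_': 'Lädt {}',
--         'save_': 'Speichert {}',
--         'spawn_': 'Erzeugt {}',
--         'lock_': 'Sperrt {}',
--         'unlock_': 'Entsperrt {}',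
--         'enable_': 'Aktiviert {}',
--         'disable_': 'Deaktiviert {}',
--         'event_': 'Wird ausgelöst, wenn {}',
--     }
--     text = None
--     for prefix, template in prefix_map.items():
--         if base.startswith(prefix):
--             rest = base[len(prefix):].replace('_', ' ')
--             text = template.format(rest)
--             break
--     if text is None:
--         text = base.replace('_', ' ').capitalize()
--     if attrs:
--         text += f" (Attribute: {', '.join(attrs)})"
--     return text + '.'
-- ===== SOURCE B (Python) =====
-- def xml_description(cmd, attrs):
--     prefix_map = {
--         'find_': 'Sucht {}',
--         'add_': 'Fügt {} hinzu',
--         'remove_': 'Entfernt {}',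
--         'set_': 'Setzt {}',
--         'get_': 'Gibt {} zurück',
--         'abort_': 'Bricht {} ab',
--         'activate_': 'Aktiviert {}',
--         'deactivate_': 'Deaktiviert {}',
--         'update_': 'Aktualisiert {}',
--         'toggle_': 'Schaltet {} um',
--         'close_': 'Schließt {}',
--         'open_': 'Öffnet {}',
--         'start_': 'Startet {}',
--         'stop_': 'Stoppt {}',
--         'clear_': 'Leert {}',
--         'reset_': 'Setzt {} zurück',
--         'calculate_': 'Berechnet {}',
--         'create_': 'Erstellt {}',
--         'destroy_': 'Zerstört {}',
--         'show_': 'Zeigt {}',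
--         'hide_': 'Versteckt {}',
--         'move_': 'Bewegt {}',
--         'select_': 'Wählt {} aus',
--         'apply_': 'Wendet {} an',
--         'load_': 'Lädt {}',
--         'save_': 'Speichert {}',
--         'spawn_': 'Erzeugt {}',
--         'lock_': 'Sperrt {}',
--         'unlock_': 'Entsperrt {}',
--         'enable_': 'Aktiviert {}',
--         'disable_': 'Deaktiviert {}',
--         'event_': 'Wird ausgelöst, wenn {}',
--     }
--     # The candidate prefix is determined by the first underscore: look it up directly
--     # instead of scanning the whole map with startswith.
--     head, sep, tail = cmd.partition('_')
--     template = prefix_map.get(head + sep) if sep else None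
--     if template is not None:
--         text = template.format(tail.replace('_', ' '))
--     else:
--         text = cmd.replace('_', ' ').capitalize()
--     if attrs:
--         text += f" (Attribute: {', '.join(attrs)})"
--     return text + '.'
-- ===== Notes on version B (the rewrite author's own statement) =====
-- stated objective: idiomatic
-- what changed: B removes A's linear startswith-scan over the 32-entry prefix map: it partitions cmd at the first underscore, looks the candidate prefix up in the dict in one step, and falls back to capitalize() when there is no underscore or no hit.
import Mathlib
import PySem

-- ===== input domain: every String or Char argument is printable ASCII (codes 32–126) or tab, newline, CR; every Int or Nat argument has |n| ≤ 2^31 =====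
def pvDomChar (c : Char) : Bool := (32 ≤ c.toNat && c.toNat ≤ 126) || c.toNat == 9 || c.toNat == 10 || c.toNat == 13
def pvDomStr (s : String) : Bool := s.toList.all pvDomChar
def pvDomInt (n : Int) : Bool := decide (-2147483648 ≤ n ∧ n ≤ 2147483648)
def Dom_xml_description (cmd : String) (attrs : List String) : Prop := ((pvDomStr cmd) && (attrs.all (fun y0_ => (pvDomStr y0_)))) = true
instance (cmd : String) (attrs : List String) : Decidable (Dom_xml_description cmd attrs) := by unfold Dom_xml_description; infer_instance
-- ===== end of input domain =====

-- B replaces A's linear startswith-scan of the prefix map by computing the candidate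
-- prefix directly from the first underscore (partition) and one direct dict lookup (idiomatic).

-- ===== PORT A =====
-- the literal prefix_map dict (shared by both ports, as both Pythons contain the same literal)
def pvPrefixMap : PySem.Dict String String := ⟨[
  ("find_", "Sucht {}"), ("add_", "Fügt {} hinzu"), ("remove_", "Entfernt {}"),
  ("set_", "Setzt {}"), ("get_", "Gibt {} zurück"), ("abort_", "Bricht {} ab"),
  ("activate_", "Aktiviert {}"), ("deactivate_", "Deaktiviert {}"),
  ("update_", "Aktualisiert {}"), ("toggle_", "Schaltet {} um"),
  ("close_", "Schließt {}"), ("open_", "Öffnet {}"), ("start_", "Startet {}"),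
  ("stop_", "Stoppt {}"), ("clear_", "Leert {}"), ("reset_", "Setzt {} zurück"),
  ("calculate_", "Berechnet {}"), ("create_", "Erstellt {}"),
  ("destroy_", "Zerstört {}"), ("show_", "Zeigt {}"), ("hide_", "Versteckt {}"),
  ("move_", "Bewegt {}"), ("select_", "Wählt {} aus"), ("apply_", "Wendet {} an"),
  ("load_", "Lädt {}"), ("save_", "Speichert {}"), ("spawn_", "Erzeugt {}"),
  ("lock_", "Sperrt {}"), ("unlock_", "Entsperrt {}"), ("enable_", "Aktiviert {}"),
  ("disable_", "Deaktiviert {}"), ("event_", "Wird ausgelöst, wenn {}")]⟩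

-- hand port of str.capitalize() (first char upper, the rest lower); exact on the ASCII domain
def pyCapitalize (s : String) : String :=
  match s.toList with
  | [] => String.ofList []
  | c :: t => String.ofList (PySem.Chars.upperChar c :: t.map PySem.Chars.lowerChar)

-- A's 'for prefix, template in prefix_map.items(): if base.startswith(prefix): …; break'
-- (break = return the first match); template.format(rest) is ported as replacing the
-- single '{}' placeholder each template contains
def pvLoopA (base : String) : List (String × String) → Option String
  | [] => none
  | (pre, template) :: rest =>
    if PySem.Str.startswith base pre then
      some (PySem.Str.replace template "{}"
        (PySem.Str.replace (PySem.Str.slice base (some (PySem.Str.len pre)) none) "_" " "))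
    else pvLoopA base rest

def xml_description (cmd : String) (attrs : List String) : String :=
  let base := cmd
  let text : String :=
    match pvLoopA base pvPrefixMap.items with
    | some t => t
    | none => pyCapitalize (PySem.Str.replace base "_" " ")
  let text := if attrs ≠ [] then text ++ " (Attribute: " ++ PySem.Str.join ", " attrs ++ ")" else text
  text ++ "."

-- ===== PORT B =====
-- hand port of cmd.partition('_') (single-character separator), exact:
-- (head, sep, tail) with sep = "_" on a hit, sep = tail = "" when there is no underscore
def pvPartitionU : List Char → List Char × List Char × List Char
  | [] => ([], [], [])
  | c :: t =>
    if c = '_' then ([], ['_'], t)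
    else
      let r := pvPartitionU t
      (c :: r.1, r.2.1, r.2.2)

def xml_description_alt (cmd : String) (attrs : List String) : String :=
  let pr := pvPartitionU cmd.toList
  -- template = prefix_map.get(head + sep) if sep else None
  let template : Option String :=
    if pr.2.1 ≠ [] then pvPrefixMap.get? (String.ofList (pr.1 ++ pr.2.1)) else none
  let text : String :=
    match template with
    | some t =>  -- template.format(tail.replace('_', ' ')), one '{}' placeholder
        PySem.Str.replace t "{}" (PySem.Str.replace (String.ofList pr.2.2) "_" " ")
    | none => pyCapitalize (PySem.Str.replace cmd "_" " ")
  let text := if attrs ≠ [] then text ++ " (Attribute: " ++ PySem.Str.join ", " attrs ++ ")" else text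
  text ++ "."

-- ===== PRECONDITION & SPEC =====
def Spec_xml_description (cmd : String) (attrs : List String) (out : String) : Prop := out = xml_description_alt cmd attrs
instance (cmd : String) (attrs : List String) (out : String) : Decidable (Spec_xml_description cmd attrs out) := by unfold Spec_xml_description; infer_instance

-- ===== CLAIM (what is proved, stated in full; the proofs are below) =====
def Claim_equal_xml_description : Prop := ∀ (cmd : String) (attrs : List String), Dom_xml_description cmd attrs → Spec_xml_description cmd attrs (xml_description cmd attrs)

-- ===== LEMMAS AND PROOFS =====

-- a well-formed map key: nonempty, ends in '_', no '_' before the last position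
def pvKeyOK (l : List Char) : Bool :=
  (l.getLast? == some '_') && l.dropLast.all (fun c => c != '_')

theorem pvKeyOK_exists {l : List Char} (h : pvKeyOK l = true) :
    ∃ w : List Char, '_' ∉ w ∧ l = w ++ ['_'] := by
  rcases l.eq_nil_or_concat with rfl | ⟨w, c, rfl⟩
  · simp [pvKeyOK] at h
  · simp [pvKeyOK, List.all_eq_true] at h
    exact ⟨w, fun hm => (h.2 '_' hm) rfl, by simp [h.1]⟩

theorem pvPartitionU_append {w : List Char} (hw : '_' ∉ w) (tl : List Char) :
    pvPartitionU (w ++ '_' :: tl) = (w, ['_'], tl) := by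
  induction w with
  | nil => simp [pvPartitionU]
  | cons a w' ih =>
    have ha : a ≠ '_' := fun h => hw (by simp [h])
    have hw' : '_' ∉ w' := fun h => hw (by simp [h])
    simp [pvPartitionU, ha, ih hw']

theorem pvPartitionU_spec (l : List Char) :
    '_' ∉ (pvPartitionU l).1 ∧ ((pvPartitionU l).2.1 = [] ∨ (pvPartitionU l).2.1 = ['_'])
      ∧ l = (pvPartitionU l).1 ++ (pvPartitionU l).2.1 ++ (pvPartitionU l).2.2 := by
  induction l with
  | nil => simp [pvPartitionU]
  | cons c t ih =>
    by_cases hc : c = '_'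
    · simp [pvPartitionU, hc]
    · obtain ⟨h1, h2, h3⟩ := ih
      refine ⟨?_, by simpa [pvPartitionU, hc] using h2, ?_⟩
      · simp [pvPartitionU, hc]
        exact ⟨fun h => hc h.symm, h1⟩
      · simp only [pvPartitionU, if_neg hc]
        simpa using h3

theorem pvScan_eq (cmd : String) (pairs : List (String × String))
    (hk : ∀ p ∈ pairs, pvKeyOK p.1.toList = true) :
    pvLoopA cmd pairs =
      Option.map (fun t => PySem.Str.replace t "{}"
          (PySem.Str.replace (String.ofList (pvPartitionU cmd.toList).2.2) "_" " "))
        (if (pvPartitionU cmd.toList).2.1 ≠ []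
          then Option.map (fun p => p.2)
            (List.find? (fun p => p.1 == String.ofList ((pvPartitionU cmd.toList).1 ++ (pvPartitionU cmd.toList).2.1)) pairs)
          else none) := by
  induction pairs with
  | nil => simp [pvLoopA]
  | cons p rest ih =>
    obtain ⟨pre, template⟩ := p
    obtain ⟨w, hw, hwl⟩ := pvKeyOK_exists (hk _ List.mem_cons_self)
    have hwl : pre.toList = w ++ ['_'] := hwl
    have ihh := ih (fun q hq => hk q (List.mem_cons_of_mem _ hq))
    by_cases hs : PySem.Str.startswith cmd pre = true
    · -- first pair matches
      have hpref : pre.toList <+: cmd.toList := by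
        rw [← PySem.Chars.startswith_iff, ← PySem.Str.startswith_eq]; exact hs
      obtain ⟨r, hr⟩ := hpref
      have hl : cmd.toList = w ++ '_' :: r := by rw [← hr, hwl]; simp
      have hpart : pvPartitionU cmd.toList = (w, ['_'], r) := by
        rw [hl]; exact pvPartitionU_append hw r
      have hkey : String.ofList (w ++ ['_']) = pre :=
        String.toList_inj.mp (by simp [hwl])
      have hslice : PySem.Str.slice cmd (some (PySem.Str.len pre)) none = String.ofList r := by
        apply String.toList_inj.mp
        simp only [PySem.Str.toList_slice, PySem.Chars.slice_eq_listSlice, PySem.Str.len]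
        rw [PySem.List.slice_from _ (Int.natCast_nonneg _)]
        simp [← hr]
      simp only [pvLoopA, if_pos hs, hpart, hkey]
      rw [List.find?_cons_of_pos (by simp)]
      simp only [Option.map_some]
      rw [hslice]
      simp
    · -- first pair does not match
      rw [show pvLoopA cmd ((pre, template) :: rest) = pvLoopA cmd rest by
            simp only [pvLoopA, if_neg hs],
          ihh]
      by_cases hsep : (pvPartitionU cmd.toList).2.1 = []
      · simp [hsep]
      · obtain ⟨h1, h2, h3⟩ := pvPartitionU_spec cmd.toList
        have hsep1 : (pvPartitionU cmd.toList).2.1 = ['_'] := h2.resolve_left hsep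
        have hne : ((pre, template).1 == String.ofList ((pvPartitionU cmd.toList).1 ++ (pvPartitionU cmd.toList).2.1)) = false := by
          rw [beq_eq_false_iff_ne]
          intro hEq
          apply hs
          rw [PySem.Str.startswith_eq, PySem.Chars.startswith_iff]
          have hpt : pre.toList = (pvPartitionU cmd.toList).1 ++ ['_'] := by
            have := congrArg String.toList hEq
            simpa [hsep1] using this
          refine ⟨(pvPartitionU cmd.toList).2.2, ?_⟩
          rw [hpt]
          conv_rhs => rw [h3, hsep1]
        rw [if_pos hsep, if_pos hsep, List.find?_cons_of_neg (by simpa using hne)]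

-- ===== VERDICT (by name: the statement is the Claim_ definition above) =====
theorem xml_description_spec : Claim_equal_xml_description := by
  intro cmd attrs _
  unfold Spec_xml_description
  simp only [xml_description, xml_description_alt]
  rw [pvScan_eq cmd pvPrefixMap.items (by decide)]
  simp only [PySem.Dict.get?]
  generalize (if (pvPartitionU cmd.toList).2.1 ≠ []
      then Option.map (fun p => p.2)
        (List.find? (fun p => p.1 == String.ofList ((pvPartitionU cmd.toList).1 ++ (pvPartitionU cmd.toList).2.1)) pvPrefixMap.items)
      else none) = o
  cases o <;> simp
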